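-- pv_equiv track=rewrite | github.com/Muath-Hamad/ChatCOC | app/python/chatbot.py | split_digits_and_words
-- ===== SOURCE A (Python) =====
-- def split_digits_and_words(s):
--     result = []
--     X = 0
--     for c in s:
--         if c.isdigit():
--             if X ==1 :
--                 X = 0
--                 result.append(" ")
--             result.append(int(c))
--         else:
--             result.append(c)
--             X = 1
--
--     s = ''.join(str(x) for x in result)
--
--     return s
-- ===== SOURCE B (Python) =====
-- def split_digits_and_words(s):
--     # Stage 1: split s into maximal runs of characters of equal isdigit-ness.
--     runs = []
--     i, n = 0, len(s)
--     while i < n: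
--         d = s[i].isdigit()
--         j = i + 1
--         while j < n and s[j].isdigit() == d:
--             j += 1
--         runs.append((d, s[i:j]))
--         i = j
--     # Stage 2: render runs; a space precedes every digit run except a leading one.
--     out = []
--     first = True
--     for d, run in runs:
--         if d:
--             if not first:
--                 out.append(' ')
--             out.extend(str(int(c)) for c in run)
--         else:
--             out.extend(run)
--         first = False
--     return ''.join(out)
-- ===== Notes on version B (the rewrite author's own statement) =====
-- stated objective: alternative
-- what changed: Replaces A's single character-by-character pass with a mutable flag X and heterogeneous int/str result list by a two-stage algorithm: first split the string into maximal runs of equal isdigit-ness, then render the run list, emitting one space before every digit run except a leading one.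
import Mathlib
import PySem

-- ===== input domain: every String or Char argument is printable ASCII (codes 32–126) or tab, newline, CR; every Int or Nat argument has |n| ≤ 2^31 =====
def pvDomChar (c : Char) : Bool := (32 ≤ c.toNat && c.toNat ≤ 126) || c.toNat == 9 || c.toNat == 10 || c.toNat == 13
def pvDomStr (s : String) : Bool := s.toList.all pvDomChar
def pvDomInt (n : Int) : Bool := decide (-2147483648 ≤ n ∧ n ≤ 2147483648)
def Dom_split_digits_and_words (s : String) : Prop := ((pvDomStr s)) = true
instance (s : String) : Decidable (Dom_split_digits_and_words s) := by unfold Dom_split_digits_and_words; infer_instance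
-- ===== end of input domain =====

-- B replaces A's single-pass flag machine by a two-stage algorithm (split into maximal
-- digit/non-digit runs, then render the run list); same cost, alternative decomposition.

-- ===== PORT A =====
-- int(c): on every char with isdigit c, ofChars? returns some, so the getD 0 default is never taken.
def pvStepA (st : List String × Int) (c : Char) : List String × Int :=
  if PySem.Chars.isdigit c then
    let st := if st.2 == 1 then (st.1 ++ [" "], (0 : Int)) else st
    (st.1 ++ [PySem.Int.toStr ((PySem.Int.ofChars? [c]).getD 0)], st.2)
  else
    (st.1 ++ [String.ofList [c]], (1 : Int))

def split_digits_and_words (s : String) : String :=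
  PySem.Str.join "" (s.toList.foldl pvStepA ([], 0)).1

-- ===== PORT B =====
-- str(int(c)) for a digit char
def pvDstr (c : Char) : String := PySem.Int.toStr ((PySem.Int.ofChars? [c]).getD 0)

-- Stage 1 of B: split into maximal runs of equal isdigit-ness (the inner while-loop is span)
def pvRuns : List Char → List (Bool × List Char)
  | [] => []
  | c :: cs =>
    let p := cs.span (fun x => PySem.Chars.isdigit x == PySem.Chars.isdigit c)
    (PySem.Chars.isdigit c, c :: p.1) :: pvRuns p.2
termination_by l => l.length
decreasing_by
  simp only [List.span_eq_takeWhile_dropWhile]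
  exact Nat.lt_succ_of_le (List.length_dropWhile_le _ _)

-- Stage 2 of B: render; the Bool is Python's `first` flag
def pvRender : Bool → List (Bool × List Char) → List String
  | _, [] => []
  | first, (d, run) :: rs =>
    (if d then (if first then [] else [" "]) ++ run.map pvDstr
     else run.map (fun ch => String.ofList [ch])) ++ pvRender false rs

def split_digits_and_words_alt (s : String) : String :=
  PySem.Str.join "" (pvRender true (pvRuns s.toList))

-- ===== PRECONDITION & SPEC =====
def Spec_split_digits_and_words (s : String) (out : String) : Prop := out = split_digits_and_words_alt s
instance (s : String) (out : String) : Decidable (Spec_split_digits_and_words s out) := by unfold Spec_split_digits_and_words; infer_instance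

-- ===== CLAIM (what is proved, stated in full; the proofs are below) =====
def Claim_equal_split_digits_and_words : Prop := ∀ (s : String), Dom_split_digits_and_words s → Spec_split_digits_and_words s (split_digits_and_words s)

-- ===== LEMMAS AND PROOFS =====

-- the pieces emitted from the string, given whether the previous char was a non-digit
def pvEmit (b : Bool) : List Char → List String
  | [] => []
  | c :: cs =>
    if PySem.Chars.isdigit c then
      (if b then [" "] else []) ++ [pvDstr c] ++ pvEmit false cs
    else
      String.ofList [c] :: pvEmit true cs

theorem pvFoldA (l : List Char) : ∀ (acc : List String) (X : Int),
    (l.foldl pvStepA (acc, X)).1 = acc ++ pvEmit (X == 1) l := by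
  induction l with
  | nil => intro acc X; simp [pvEmit]
  | cons c cs ih =>
    intro acc X
    rw [List.foldl_cons]
    by_cases hd : PySem.Chars.isdigit c = true
    · by_cases hX : (X == 1) = true
      · rw [show pvStepA (acc, X) c = (acc ++ [" "] ++ [pvDstr c], (0 : Int)) from by
          simp [pvStepA, hd, hX, pvDstr], ih]
        simp [pvEmit, hd, hX]
      · rw [show pvStepA (acc, X) c = (acc ++ [pvDstr c], X) from by
          simp [pvStepA, hd, hX, pvDstr], ih]
        simp [pvEmit, hd, hX]
    · rw [show pvStepA (acc, X) c = (acc ++ [String.ofList [c]], (1 : Int)) from by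
        simp [pvStepA, hd], ih]
      simp [pvEmit, hd]

-- pvEmit ignores its flag when the head is a non-digit (or the list is empty)
theorem pvEmit_flag_irrel (rest : List Char)
    (h : ∀ c, rest.head? = some c → PySem.Chars.isdigit c = false) :
    pvEmit false rest = pvEmit true rest := by
  cases rest with
  | nil => rfl
  | cons c cs => simp [pvEmit, h c rfl]

-- emitting through an all-digit run
theorem pvEmit_digit_run (run rest : List Char)
    (h : ∀ c ∈ run, PySem.Chars.isdigit c = true) :
    pvEmit false (run ++ rest) = run.map pvDstr ++ pvEmit false rest := by
  induction run with
  | nil => simp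
  | cons c cs ih =>
    simp only [List.cons_append, pvEmit, h c (by simp)]
    simp [ih (fun x hx => h x (by simp [hx]))]

-- emitting through an all-non-digit run
theorem pvEmit_word_run (run rest : List Char)
    (h : ∀ c ∈ run, PySem.Chars.isdigit c = false) :
    pvEmit true (run ++ rest) = run.map (fun ch => String.ofList [ch]) ++ pvEmit true rest := by
  induction run with
  | nil => simp
  | cons c cs ih =>
    simp only [List.cons_append, pvEmit, h c (by simp)]
    simp [ih (fun x hx => h x (by simp [hx]))]

theorem pvTakeWhile_run {q : Char → Bool} (run rest : List Char)
    (h1 : ∀ x ∈ run, q x = true) (h2 : ∀ x, rest.head? = some x → q x = false) :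
    List.takeWhile q (run ++ rest) = run := by
  induction run with
  | nil =>
    cases rest with
    | nil => rfl
    | cons r rs => simp [h2 r rfl]
  | cons a as ih =>
    simp [h1 a (by simp), ih (fun x hx => h1 x (by simp [hx]))]

theorem pvRunsEmit (l : List Char) : ∀ (b : Bool),
    pvRender b (pvRuns l) = pvEmit (!b) l := by
  induction l using pvRuns.induct with
  | case1 => intro b; simp [pvRuns, pvRender, pvEmit]
  | case2 c cs p ih =>
    intro b
    rw [pvRuns]
    have hspan : p = cs.span (fun x => PySem.Chars.isdigit x == PySem.Chars.isdigit c) := rfl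
    have htw : p.1 = cs.takeWhile (fun x => PySem.Chars.isdigit x == PySem.Chars.isdigit c) := by
      rw [hspan, List.span_eq_takeWhile_dropWhile]
    have hdw : p.2 = cs.dropWhile (fun x => PySem.Chars.isdigit x == PySem.Chars.isdigit c) := by
      rw [hspan, List.span_eq_takeWhile_dropWhile]
    have hcs : cs = p.1 ++ p.2 := by rw [htw, hdw]; simp
    have hrun : ∀ x ∈ p.1, PySem.Chars.isdigit x = PySem.Chars.isdigit c := by
      intro x hx
      have := List.mem_takeWhile_imp (htw ▸ hx)
      simpa using this
    have hrest : ∀ x, p.2.head? = some x →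
        PySem.Chars.isdigit x ≠ PySem.Chars.isdigit c := by
      intro x hx
      have := List.head?_dropWhile_not (p := fun y => PySem.Chars.isdigit y == PySem.Chars.isdigit c) cs
      rw [← hdw, hx] at this
      simpa using this
    rw [pvRender, ih]
    by_cases hd : PySem.Chars.isdigit c = true
    · have : pvEmit (!b) (c :: cs) =
          (if b then [] else [" "]) ++ [pvDstr c] ++ pvEmit false cs := by
        cases b <;> simp [pvEmit, hd]
      rw [this, hcs, pvEmit_digit_run p.1 p.2 (fun x hx => (hrun x hx).trans hd)]
      have hflag : pvEmit false p.2 = pvEmit true p.2 :=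
        pvEmit_flag_irrel p.2 (fun x hx => by
          have := hrest x hx; rw [hd] at this
          exact Bool.eq_false_iff.mpr this)
      have htk : List.takeWhile (fun x => PySem.Chars.isdigit x) (p.1 ++ p.2) = p.1 :=
        pvTakeWhile_run _ _ (fun x hx => (hrun x hx).trans hd)
          (fun x hx => by
            have := hrest x hx; rw [hd] at this
            exact Bool.eq_false_iff.mpr this)
      simp [hd, hflag, htk]
    · have hd' : PySem.Chars.isdigit c = false := Bool.eq_false_iff.mpr hd
      have : pvEmit (!b) (c :: cs) = String.ofList [c] :: pvEmit true cs := by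
        cases b <;> simp [pvEmit, hd']
      rw [this, hcs, pvEmit_word_run p.1 p.2 (fun x hx => (hrun x hx).trans hd')]
      have htk : List.takeWhile (fun x => !PySem.Chars.isdigit x) (p.1 ++ p.2) = p.1 :=
        pvTakeWhile_run _ _ (fun x hx => by simp [(hrun x hx).trans hd'])
          (fun x hx => by
            have := hrest x hx; rw [hd'] at this
            simp [Bool.of_not_eq_false this])
      simp [hd', htk]

-- ===== VERDICT (by name: the statement is the Claim_ definition above) =====
theorem split_digits_and_words_spec : Claim_equal_split_digits_and_words := by
  intro s _
  unfold Spec_split_digits_and_words split_digits_and_words split_digits_and_words_alt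
  rw [pvFoldA, pvRunsEmit]
  simp
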